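-- pv_equiv track=rewrite | github.com/Sam4000der2/selenium_twitter_Webcrawler_de | telegram_control_bot.py | detect_bot_and_message
-- ===== SOURCE A (Python) =====
-- def detect_bot_and_message(rest: str, bot_names: list[str]) -> tuple[str, str]:
--     """
--     Sucht nach '<bot_name>:' im rest.
--     Gibt (group, pure_message_after_botname) zurück.
--     Falls kein bot_name gefunden: ('nicht_zuordenbar', rest)
--     """
--     r = rest or ""
--     best_bot = None
--     best_idx = None
--
--     for bot in bot_names:
--         needle = f"{bot}:"
--         idx = r.find(needle)
--         if idx != -1:
--             if best_idx is None or idx < best_idx: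
--                 best_idx = idx
--                 best_bot = bot
--
--     if best_bot is None:
--         return "nicht_zuordenbar", r.strip()
--
--     msg = r[best_idx + len(best_bot) + 1:].strip()  # +1 für ':'
--     if not msg:
--         msg = "(leer)"
--     return best_bot, msg
-- ===== SOURCE B (Python) =====
-- def detect_bot_and_message(rest: str, bot_names: list[str]) -> tuple[str, str]:
--     """Colon-anchored scan: every match of '<bot>:' ends at a ':' in the text, so
--     only colon positions are examined; keep the lexicographically least
--     (match position, name index) candidate."""
--     r = rest or ""
--     best = None  # (match position, name index)
--     for j, ch in enumerate(r):
--         if ch == ':':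
--             for k, bot in enumerate(bot_names):
--                 i = j - len(bot)
--                 if i >= 0 and (best is None or (i, k) < best) and r.startswith(bot, i):
--                     best = (i, k)
--     if best is None:
--         return "nicht_zuordenbar", r.strip()
--     i, k = best
--     bot = bot_names[k]
--     msg = r[i + len(bot) + 1:].strip()
--     return bot, (msg if msg else "(leer)")
-- ===== Notes on version B (the rewrite author's own statement) =====
-- stated objective: faster
-- what changed: A runs str.find over the whole text for every bot name and keeps a running argmin; B scans the text once for ':' characters and only at those anchor positions tests which names end there, keeping the lexicographically least (position, name index) candidate.
import Mathlib
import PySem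

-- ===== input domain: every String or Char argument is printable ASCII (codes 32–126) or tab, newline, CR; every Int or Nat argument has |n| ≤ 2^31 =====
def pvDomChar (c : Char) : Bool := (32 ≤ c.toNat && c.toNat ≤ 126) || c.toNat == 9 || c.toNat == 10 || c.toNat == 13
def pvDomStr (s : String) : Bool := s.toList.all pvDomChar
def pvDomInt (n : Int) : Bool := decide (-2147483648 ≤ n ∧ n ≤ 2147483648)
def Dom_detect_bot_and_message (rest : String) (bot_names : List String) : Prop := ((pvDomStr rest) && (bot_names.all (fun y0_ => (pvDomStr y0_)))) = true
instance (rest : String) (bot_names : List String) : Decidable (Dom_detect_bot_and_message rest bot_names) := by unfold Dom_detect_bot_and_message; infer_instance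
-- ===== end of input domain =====

-- B replaces A's per-name full-text find loop by a colon-anchored scan: only the ':'
-- positions of the text are examined, keeping the least (position, name index) candidate.

-- ===== PORT A =====
-- one loop step of A: update (best_bot, best_idx) with this bot's find result
def aStep (r : List Char) (st : Option String × Option Int) (bot : String) :
    Option String × Option Int :=
  let idx := PySem.Chars.find r (bot.toList ++ [':'])
  if idx ≠ -1 then
    match st.2 with
    | none => (some bot, some idx)
    | some b => if idx < b then (some bot, some idx) else st
  else st

def detect_bot_and_message (rest : String) (bot_names : List String) : String × String :=
  let r := rest.toList
  match bot_names.foldl (aStep r) (none, none) with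
  | (some bot, some idx) =>
      let msg := PySem.Chars.strip (PySem.List.slice r (some (idx + bot.toList.length + 1)) none)
      if msg = [] then (bot, "(leer)") else (bot, String.ofList msg)
  | _ => ("nicht_zuordenbar", String.ofList (PySem.Chars.strip r))

-- ===== PORT B =====
-- Python's tuple comparison '(i, k) < best' chained with 'best is None or'
def bBetter (p : Int × Int) : Option (Int × Int) → Bool
  | none => true
  | some b => p.1 < b.1 || (p.1 == b.1 && p.2 < b.2)

-- inner for-loop body: candidate (i, k) for name kb at colon position j
def bStep (r : List Char) (j : Int) (best : Option (Int × Int)) (kb : Int × String) :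
    Option (Int × Int) :=
  let i : Int := j - kb.2.toList.length
  if 0 ≤ i && bBetter (i, kb.1) best
      && PySem.Chars.startswith (List.drop i.toNat r) kb.2.toList then
    some (i, kb.1)
  else best

-- outer for-loop body: names are tried only at ':' characters
def bColonStep (r : List Char) (names : List String) (best : Option (Int × Int))
    (jc : Int × Char) : Option (Int × Int) :=
  if jc.2 = ':' then (PySem.List.enumerate names).foldl (bStep r jc.1) best else best

def bBest (r : List Char) (names : List String) : Option (Int × Int) :=
  (PySem.List.enumerate r).foldl (bColonStep r names) none

def detect_bot_and_message_alt (rest : String) (bot_names : List String) : String × String :=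
  let r := rest.toList
  match bBest r bot_names with
  | none => ("nicht_zuordenbar", String.ofList (PySem.Chars.strip r))
  | some (i, k) =>
      let bot := (PySem.List.pyGet? bot_names k).getD ""
      let msg := PySem.Chars.strip (List.drop (i + bot.toList.length + 1).toNat r)
      (bot, if msg = [] then "(leer)" else String.ofList msg)

-- ===== PRECONDITION & SPEC =====
def Spec_detect_bot_and_message (rest : String) (bot_names : List String) (out : String × String) : Prop := out = detect_bot_and_message_alt rest bot_names
instance (rest : String) (bot_names : List String) (out : String × String) : Decidable (Spec_detect_bot_and_message rest bot_names out) := by unfold Spec_detect_bot_and_message; infer_instance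

-- ===== CLAIM (what is proved, stated in full; the proofs are below) =====
def Claim_equal_detect_bot_and_message : Prop := ∀ (rest : String) (bot_names : List String), Dom_detect_bot_and_message rest bot_names → Spec_detect_bot_and_message rest bot_names (detect_bot_and_message rest bot_names)

-- ===== LEMMAS AND PROOFS =====

-- a prefix of a dropped suffix is an infix of the whole
theorem pv_prefix_drop_infix {p r : List Char} {j : Nat} (h : p <+: r.drop j) : p <:+: r := by
  obtain ⟨u, hu⟩ := h
  exact ⟨r.take j, u, by rw [List.append_assoc, hu, List.take_append_drop]⟩

-- if p occurs (as prefix) at position j then find points no later than j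
theorem pv_find_le_of_prefix_drop {r p : List Char} {j : Nat} (h : p <+: r.drop j) :
    0 ≤ PySem.Chars.find r p ∧ (PySem.Chars.find r p).toNat ≤ j := by
  have h0 : 0 ≤ PySem.Chars.find r p :=
    (PySem.Chars.find_nonneg_iff r p).2 (pv_prefix_drop_infix h)
  refine ⟨h0, ?_⟩
  by_contra hj
  exact (PySem.Chars.find_spec h0).2 j (by omega) h

-- invariant of A's fold: the state is either empty with no pattern found, or the
-- first pattern (in list order) attaining the minimal find index
def AGood (r : List Char) (processed : List String) (st : Option String × Option Int) : Prop :=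
  (st = (none, none) ∧ ∀ b ∈ processed, PySem.Chars.find r (b.toList ++ [':']) = -1)
  ∨ (∃ bot idx pre post, st = (some bot, some idx) ∧ processed = pre ++ bot :: post
      ∧ PySem.Chars.find r (bot.toList ++ [':']) = idx ∧ idx ≠ -1
      ∧ (∀ b ∈ pre, PySem.Chars.find r (b.toList ++ [':']) = -1 ∨ idx < PySem.Chars.find r (b.toList ++ [':']))
      ∧ (∀ b ∈ post, PySem.Chars.find r (b.toList ++ [':']) = -1 ∨ idx ≤ PySem.Chars.find r (b.toList ++ [':'])))

theorem pv_aStep_good {r : List Char} {pr : List String} {st : Option String × Option Int}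
    (h : AGood r pr st) (c : String) : AGood r (pr ++ [c]) (aStep r st c) := by
  rcases h with ⟨hst, hall⟩ | ⟨bot, idx, pre, post, hst, hsplit, hfind, hne, hpre, hpost⟩
  · subst hst
    by_cases hc : PySem.Chars.find r (c.toList ++ [':']) = -1
    · left
      refine ⟨by simp [aStep, hc], ?_⟩
      intro b hb
      rcases List.mem_append.1 hb with hb | hb
      · exact hall b hb
      · simp at hb; subst hb; exact hc
    · right
      exact ⟨c, _, pr, [], by simp [aStep, hc], by simp, rfl, hc,
        fun b hb => Or.inl (hall b hb), by simp⟩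
  · subst hst
    by_cases hc : PySem.Chars.find r (c.toList ++ [':']) = -1
    · right
      refine ⟨bot, idx, pre, post ++ [c], by simp [aStep, hc], by simp [hsplit], hfind, hne, hpre, ?_⟩
      intro b hb
      rcases List.mem_append.1 hb with hb | hb
      · exact hpost b hb
      · simp at hb; subst hb; exact Or.inl hc
    · by_cases hlt : PySem.Chars.find r (c.toList ++ [':']) < idx
      · right
        refine ⟨c, _, pre ++ bot :: post, [], by simp [aStep, hc, hlt], by simp [hsplit], rfl, hc, ?_, by simp⟩
        intro b hb
        rcases List.mem_append.1 hb with hb | hb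
        · rcases hpre b hb with h1 | h1
          · exact Or.inl h1
          · exact Or.inr (by omega)
        · rcases List.mem_cons.1 hb with hb | hb
          · subst hb; exact Or.inr (by omega)
          · rcases hpost b hb with h1 | h1
            · exact Or.inl h1
            · exact Or.inr (by omega)
      · right
        refine ⟨bot, idx, pre, post ++ [c], by simp [aStep, hc, hlt], by simp [hsplit], hfind, hne, hpre, ?_⟩
        intro b hb
        rcases List.mem_append.1 hb with hb | hb
        · exact hpost b hb
        · simp at hb; subst hb; exact Or.inr (by omega)

theorem pv_foldl_good (r : List Char) :
    ∀ (names pr : List String) (st : Option String × Option Int),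
      AGood r pr st → AGood r (pr ++ names) (names.foldl (aStep r) st)
  | [], pr, st, h => by simpa using h
  | c :: names, pr, st, h => by
      have := pv_foldl_good r names (pr ++ [c]) (aStep r st c) (pv_aStep_good h c)
      simpa [List.foldl] using this

-- membership in PySem's enumerate
theorem pv_mem_enumerate {α : Type} (xs : List α) (s : Int) (q : Int × α) :
    q ∈ PySem.List.enumerate xs s ↔ ∃ t : Nat, xs[t]? = some q.2 ∧ q.1 = s + t := by
  rw [List.mem_iff_getElem?]
  constructor
  · rintro ⟨t, ht⟩
    rw [PySem.List.getElem?_enumerate] at ht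
    cases hx : xs[t]? with
    | none => rw [hx] at ht; simp at ht
    | some x =>
        rw [hx] at ht
        simp only [Option.map_some, Option.some.injEq] at ht
        rcases ht with rfl
        exact ⟨t, hx, rfl⟩
  · rintro ⟨t, hx, hq⟩
    refine ⟨t, ?_⟩
    rw [PySem.List.getElem?_enumerate, hx]
    obtain ⟨q1, q2⟩ := q
    simp_all

-- a colon right after p turns a bare prefix into a needle prefix
theorem pv_needle_prefix {r bot : List Char} {i : Nat}
    (hc : r[i + bot.length]? = some ':') :
    bot <+: r.drop i ↔ (bot ++ [':']) <+: r.drop i := by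
  constructor
  · rintro ⟨u, hu⟩
    have hg : (r.drop i)[bot.length]? = some ':' := by
      rw [List.getElem?_drop]; exact hc
    rw [← hu, List.getElem?_append_right (le_refl _)] at hg
    simp only [Nat.sub_self] at hg
    cases u with
    | nil => simp at hg
    | cons x u' =>
        simp only [List.getElem?_cons_zero, Option.some.injEq] at hg
        subst hg
        exact ⟨u', by rw [← hu]; simp⟩
  · intro h
    exact (List.prefix_append bot [':']).trans h

-- candidate set of B's scan: name k matches (with its trailing colon) at position i
def Cand (r : List Char) (names : List String) (i k : Int) : Prop :=
  0 ≤ i ∧ 0 ≤ k ∧ ∃ bot, names[k.toNat]? = some bot ∧ (bot.toList ++ [':']) <+: r.drop i.toNat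

-- invariant of B's folds: best is none on an empty seen-set, else the lex-least seen pair
def PvInv (S : Int → Int → Prop) (best : Option (Int × Int)) : Prop :=
  (best = none ∧ ∀ i k, ¬ S i k) ∨
  (∃ i k, best = some (i, k) ∧ S i k ∧ ∀ i' k', S i' k' → i < i' ∨ (i = i' ∧ k ≤ k'))

theorem pv_inv_iff {S S' : Int → Int → Prop} {best : Option (Int × Int)}
    (h : ∀ i k, S i k ↔ S' i k) (hi : PvInv S best) : PvInv S' best := by
  rcases hi with ⟨h1, h2⟩ | ⟨i, k, h1, h2, h3⟩
  · exact Or.inl ⟨h1, fun i k hS => h2 i k ((h i k).2 hS)⟩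
  · exact Or.inr ⟨i, k, h1, (h i k).1 h2, fun i' k' hS => h3 i' k' ((h i' k').2 hS)⟩

theorem pv_inner (r : List Char) (j : Int) :
    ∀ (es : List (Int × String)) (best : Option (Int × Int)) (S : Int → Int → Prop),
      PvInv S best →
      PvInv (fun i k => S i k ∨ ∃ bot, (k, bot) ∈ es ∧ i = j - bot.toList.length ∧ 0 ≤ i ∧
              PySem.Chars.startswith (List.drop i.toNat r) bot.toList = true)
        (es.foldl (bStep r j) best)
  | [], best, S, h => by
      refine pv_inv_iff (fun i k => ?_) h
      simp
  | e :: es, best, S, h => by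
      have hstep : PvInv (fun i k => S i k ∨ (k = e.1 ∧ i = j - e.2.toList.length ∧ 0 ≤ i ∧
          PySem.Chars.startswith (List.drop (j - (e.2.toList.length : Int)).toNat r) e.2.toList = true))
          (bStep r j best e) := by
        by_cases hc : (decide (0 ≤ j - (e.2.toList.length : Int)) && bBetter (j - e.2.toList.length, e.1) best
            && PySem.Chars.startswith (List.drop (j - (e.2.toList.length : Int)).toNat r) e.2.toList) = true
        · have hb : bStep r j best e = some (j - e.2.toList.length, e.1) := by
            simp only [bStep]; rw [if_pos hc]
          simp only [Bool.and_eq_true, decide_eq_true_eq] at hc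
          obtain ⟨⟨h0, hbet⟩, hs⟩ := hc
          rw [hb]
          refine Or.inr ⟨_, _, rfl, Or.inr ⟨rfl, rfl, h0, hs⟩, ?_⟩
          rintro i' k' (hS | ⟨hk, hi, _, _⟩)
          · rcases h with ⟨_, hemp⟩ | ⟨ib, kb, hbe, _, hmin⟩
            · exact absurd hS (hemp i' k')
            · subst hbe
              simp only [bBetter, Bool.or_eq_true, decide_eq_true_eq, Bool.and_eq_true,
                beq_iff_eq] at hbet
              rcases hmin i' k' hS with h1 | h1 <;> rcases hbet with h2 | h2 <;> omega
          · subst hk; subst hi; exact Or.inr ⟨rfl, le_refl _⟩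
        · have hb : bStep r j best e = best := by
            simp only [bStep]; rw [if_neg hc]
          rw [hb]
          rcases h with ⟨hbe, hemp⟩ | ⟨ib, kb, hbe, hmem, hmin⟩
          · subst hbe
            left
            refine ⟨rfl, ?_⟩
            rintro i k (hS | ⟨hk, hi, h0, hs⟩)
            · exact hemp i k hS
            · subst hi
              exact hc (by
                simp only [Bool.and_eq_true, decide_eq_true_eq]
                exact ⟨⟨h0, rfl⟩, hs⟩)
          · subst hbe
            refine Or.inr ⟨ib, kb, rfl, Or.inl hmem, ?_⟩
            rintro i' k' (hS | ⟨hk, hi, h0, hs⟩)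
            · exact hmin i' k' hS
            · subst hk; subst hi
              have hbet : bBetter (j - (e.2.toList.length : Int), e.1) (some (ib, kb)) = false := by
                by_contra hbt
                rw [Bool.not_eq_false] at hbt
                exact hc (by
                  simp only [Bool.and_eq_true, decide_eq_true_eq]
                  exact ⟨⟨h0, hbt⟩, hs⟩)
              simp only [bBetter, Bool.or_eq_false_iff, decide_eq_false_iff_not,
                Bool.and_eq_false_iff, beq_eq_false_iff_ne] at hbet
              rcases hbet with ⟨h1, h2 | h2⟩ <;> omega
      have hrec := pv_inner r j es (bStep r j best e) _ hstep
      refine pv_inv_iff (fun i k => ?_) hrec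
      constructor
      · rintro ((hS | ⟨hk, hi, h0, hs⟩) | ⟨bot, hmem, hrest⟩)
        · exact Or.inl hS
        · subst hk; subst hi
          exact Or.inr ⟨e.2, by rw [Prod.mk.eta]; exact List.mem_cons_self, rfl, h0, hs⟩
        · exact Or.inr ⟨bot, List.mem_cons_of_mem _ hmem, hrest⟩
      · rintro (hS | ⟨bot, hmem, hrest⟩)
        · exact Or.inl (Or.inl hS)
        · rcases List.mem_cons.1 hmem with hme | hme
          · left; right
            have hk : k = e.1 := by rw [← hme]
            have hbot : bot = e.2 := by rw [← hme]
            subst hbot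
            exact ⟨hk, hrest.1, hrest.2.1, by rw [← hrest.1]; exact hrest.2.2⟩
          · exact Or.inr ⟨bot, hme, hrest⟩

theorem pv_outer (r : List Char) (names : List String) :
    ∀ (es : List (Int × Char)) (best : Option (Int × Int)) (S : Int → Int → Prop),
      PvInv S best →
      PvInv (fun i k => S i k ∨ ∃ j bot, (j, ':') ∈ es ∧ (k, bot) ∈ PySem.List.enumerate names 0 ∧
              i = j - bot.toList.length ∧ 0 ≤ i ∧
              PySem.Chars.startswith (List.drop i.toNat r) bot.toList = true)
        (es.foldl (bColonStep r names) best)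
  | [], best, S, h => by
      refine pv_inv_iff (fun i k => ?_) h
      simp
  | e :: es, best, S, h => by
      by_cases hc : e.2 = ':'
      · have hstep : bColonStep r names best e
            = (PySem.List.enumerate names).foldl (bStep r e.1) best := by
          simp [bColonStep, hc]
        have h1 := pv_inner r e.1 (PySem.List.enumerate names) best S h
        rw [← hstep] at h1
        have h2 := pv_outer r names es (bColonStep r names best e) _ h1
        refine pv_inv_iff (fun i k => ?_) h2
        constructor
        · rintro ((hS | ⟨bot, hmem, hrest⟩) | ⟨j, bot, hj, hmem, hrest⟩)
          · exact Or.inl hS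
          · exact Or.inr ⟨e.1, bot, by rw [← hc, Prod.mk.eta]; exact List.mem_cons_self, hmem, hrest⟩
          · exact Or.inr ⟨j, bot, List.mem_cons_of_mem _ hj, hmem, hrest⟩
        · rintro (hS | ⟨j, bot, hj, hmem, hrest⟩)
          · exact Or.inl (Or.inl hS)
          · rcases List.mem_cons.1 hj with hje | hje
            · left; right
              have hj1 : j = e.1 := by rw [← hje]
              subst hj1
              exact ⟨bot, hmem, hrest⟩
            · exact Or.inr ⟨j, bot, hje, hmem, hrest⟩
      · have hstep : bColonStep r names best e = best := by
          simp [bColonStep, hc]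
        rw [List.foldl_cons, hstep]
        have h2 := pv_outer r names es best S h
        refine pv_inv_iff (fun i k => ?_) h2
        constructor
        · rintro (hS | ⟨j, bot, hj, hrest⟩)
          · exact Or.inl hS
          · exact Or.inr ⟨j, bot, List.mem_cons_of_mem _ hj, hrest⟩
        · rintro (hS | ⟨j, bot, hj, hrest⟩)
          · exact Or.inl hS
          · rcases List.mem_cons.1 hj with hje | hje
            · exact absurd (by rw [← hje] : e.2 = ':') hc
            · exact Or.inr ⟨j, bot, hje, hrest⟩

-- the final seen-set is exactly Cand
theorem pv_bBest_inv (r : List Char) (names : List String) :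
    PvInv (Cand r names) (bBest r names) := by
  have h0 : PvInv (fun _ _ => False) (none : Option (Int × Int)) :=
    Or.inl ⟨rfl, fun _ _ h => h⟩
  have h1 := pv_outer r names (PySem.List.enumerate r 0) none _ h0
  refine pv_inv_iff (fun i k => ?_) h1
  constructor
  · rintro (h | ⟨j, bot, hj, hmem, hi, h0i, hs⟩)
    · exact absurd h (fun h => h)
    · obtain ⟨t, hrt, hjt⟩ := (pv_mem_enumerate r 0 (j, ':')).1 hj
      obtain ⟨u, hnu, hku⟩ := (pv_mem_enumerate names 0 (k, bot)).1 hmem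
      simp only [zero_add] at hjt hku
      refine ⟨h0i, by omega, bot, by rw [hku]; simpa using hnu, ?_⟩
      rw [← pv_needle_prefix]
      · exact (PySem.Chars.startswith_iff _ _).1 hs
      · have : i.toNat + bot.toList.length = t := by omega
        rw [this]; exact hrt
  · rintro ⟨h0i, h0k, bot, hn, hpre⟩
    right
    have hbp : bot.toList <+: r.drop i.toNat := (List.prefix_append bot.toList [':']).trans hpre
    have hcol : r[i.toNat + bot.toList.length]? = some ':' := by
      obtain ⟨u, hu⟩ := hpre
      have : (r.drop i.toNat)[bot.toList.length]? = some ':' := by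
        rw [← hu, List.append_assoc, List.getElem?_append_right (le_refl _)]
        simp
      rw [← List.getElem?_drop]; exact this
    refine ⟨i + bot.toList.length, bot, ?_, ?_, by omega, h0i,
      (PySem.Chars.startswith_iff _ _).2 hbp⟩
    · rw [pv_mem_enumerate]
      exact ⟨i.toNat + bot.toList.length, by simpa using hcol, by omega⟩
    · rw [pv_mem_enumerate]
      exact ⟨k.toNat, by simpa using hn, by omega⟩

-- ===== VERDICT (by name: the statement is the Claim_ definition above) =====
theorem detect_bot_and_message_spec : Claim_equal_detect_bot_and_message := by
  intro rest bot_names _dom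
  unfold Spec_detect_bot_and_message
  set r := rest.toList with hr
  have hGood : AGood r bot_names (bot_names.foldl (aStep r) (none, none)) := by
    simpa using pv_foldl_good r bot_names [] (none, none) (Or.inl ⟨rfl, by simp⟩)
  have hInv := pv_bBest_inv r bot_names
  rcases hGood with ⟨hst, hall⟩ | ⟨bot, idx, pre, post, hst, hsplit, hfind, hne, hpre, hpost⟩
  · -- no needle occurs anywhere: both take the fallback branch
    have hnone : bBest r bot_names = none := by
      rcases hInv with ⟨h1, _⟩ | ⟨i, k, h1, ⟨_, _, b, hb, hbpre⟩, _⟩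
      · exact h1
      · exfalso
        have hmem : b ∈ bot_names := List.mem_of_getElem? hb
        have : PySem.Chars.find r (b.toList ++ [':']) = -1 := hall b hmem
        rw [PySem.Chars.find_eq_neg_one_iff] at this
        exact this (pv_prefix_drop_infix hbpre)
    simp [detect_bot_and_message, detect_bot_and_message_alt, bBest, ← hr, hst] at hnone ⊢
    simp [hnone]
  · -- bot is the first name attaining the minimal index idx
    have h0 : 0 ≤ idx := by
      have h1 := PySem.Chars.neg_one_le_find r (bot.toList ++ [':'])
      rw [hfind] at h1; omega
    have hspec := PySem.Chars.find_spec (s := r) (sub := bot.toList ++ [':'])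
      (by rw [hfind]; exact h0)
    rw [hfind] at hspec
    obtain ⟨hprefix, hminpos⟩ := hspec
    have hcase : ∀ b ∈ bot_names, PySem.Chars.find r (b.toList ++ [':']) = -1 ∨
        idx ≤ PySem.Chars.find r (b.toList ++ [':']) := by
      intro b hb
      rw [hsplit] at hb
      rcases List.mem_append.1 hb with h1 | h1
      · rcases hpre b h1 with h2 | h2
        · exact Or.inl h2
        · exact Or.inr h2.le
      · rcases List.mem_cons.1 h1 with h1 | h1
        · subst h1; rw [hfind]; exact Or.inr le_rfl
        · rcases hpost b h1 with h2 | h2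
          · exact Or.inl h2
          · exact Or.inr h2
    have hstar : Cand r bot_names idx (pre.length : Int) := by
      refine ⟨h0, by omega, bot, ?_, by simpa using hprefix⟩
      rw [hsplit]
      simp
    -- the invariant forces bBest = some (idx, pre.length)
    have hbb : bBest r bot_names = some (idx, (pre.length : Int)) := by
      rcases hInv with ⟨_, hemp⟩ | ⟨i, k, h1, ⟨hi0, hk0, bk, hbk, hbkpre⟩, hmin⟩
      · exact absurd hstar (hemp _ _)
      · -- (i,k) is minimal; show it equals (idx, pre.length)
        have hle1 : i < idx ∨ (i = idx ∧ k ≤ (pre.length : Int)) := hmin _ _ hstar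
        have hbkmem : bk ∈ bot_names := List.mem_of_getElem? hbk
        obtain ⟨hf0, hfle⟩ := pv_find_le_of_prefix_drop hbkpre
        have hfc := hcase bk hbkmem
        have hi_ge : idx ≤ i := by
          rcases hfc with h2 | h2 <;> omega
        have hk_ge : i = idx → (pre.length : Int) ≤ k := by
          intro hieq
          by_contra hklt
          rw [not_le] at hklt
          -- k < pre.length: bk lies in pre, contradicting hpre
          have hkpre : bot_names[k.toNat]? = pre[k.toNat]? := by
            rw [hsplit, List.getElem?_append_left (by omega)]
          have hbkpre' : bk ∈ pre := List.mem_of_getElem? (hkpre ▸ hbk)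
          rcases hpre bk hbkpre' with h2 | h2 <;> omega
        have : i = idx ∧ k = (pre.length : Int) := by
          rcases hle1 with h2 | h2
          · omega
          · have := hk_ge h2.1; omega
        rw [h1, this.1, this.2]
    -- assemble both outputs
    have hget : (PySem.List.pyGet? bot_names (pre.length : Int)).getD "" = bot := by
      rw [PySem.List.pyGet?_natCast]
      rw [hsplit]
      simp
    have hslice : PySem.List.slice r (some (idx + bot.toList.length + 1)) none
        = List.drop (idx + bot.toList.length + 1).toNat r :=
      PySem.List.slice_from r (by omega)
    simp only [detect_bot_and_message, detect_bot_and_message_alt, ← hr, hst, hbb, hget, hslice]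
    split <;> simp_all
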